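-- pv_equiv track=rewrite | github.com/VojtasekP/equi-act | tables/to_latex_specs.py | extract_shared
-- ===== SOURCE A (Python) =====
-- def extract_shared(configs):
--     """Return hyperparameters that are identical across all configs."""
--     if not configs:
--         raise SystemExit("No configurations found.")
--
--     varying = {"activation_type", "bn", "seed", "project"}
--     sample_config = next(iter(configs.values()))
--     shared = {}
--     for key, first_value in sample_config.items():
--         if key in varying:
--             continue
--         if all(cfg.get(key) == first_value for cfg in configs.values()):
--             shared[key] = first_value
--     return shared
-- ===== SOURCE B (Python) =====
-- def extract_shared(configs):
--     """Return hyperparameters that are identical across all configs."""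
--     if not configs:
--         raise SystemExit("No configurations found.")
--
--     varying = {"activation_type", "bn", "seed", "project"}
--     counts = {}
--     for cfg in configs.values():
--         for item in cfg.items():
--             counts[item] = counts.get(item, 0) + 1
--     n = len(configs)
--     first = next(iter(configs.values()))
--     return {k: v for k, v in first.items()
--             if k not in varying and counts.get((k, v), 0) == n}
-- ===== Notes on version B (the rewrite author's own statement) =====
-- stated objective: alternative
-- what changed: A tests each first-config key with an inner all(...) scan over every config; B instead builds one hash counter of (key, value) items over all configs in a single pass and keeps the first config's non-varying items whose pair count equals the number of configs, so the per-key inner scan disappears.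
import Mathlib
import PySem

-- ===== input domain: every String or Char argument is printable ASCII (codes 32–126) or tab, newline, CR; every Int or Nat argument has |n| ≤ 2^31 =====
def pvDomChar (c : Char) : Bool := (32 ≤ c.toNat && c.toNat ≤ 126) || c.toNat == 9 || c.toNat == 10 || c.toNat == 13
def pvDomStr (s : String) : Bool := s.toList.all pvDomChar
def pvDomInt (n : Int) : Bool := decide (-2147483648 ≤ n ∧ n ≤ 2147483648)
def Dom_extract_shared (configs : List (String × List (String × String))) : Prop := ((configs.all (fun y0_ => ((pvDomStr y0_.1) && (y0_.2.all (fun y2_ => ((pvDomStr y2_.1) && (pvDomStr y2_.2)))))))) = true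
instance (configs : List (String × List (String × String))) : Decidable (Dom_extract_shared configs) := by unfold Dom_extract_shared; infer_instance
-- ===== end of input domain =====

-- B replaces A's key-outer all(...) scan by one counting pass: a hash counter of
-- (key, value) items over all configs, then a filter on the first config ('alternative').


-- ===== PORT A =====
-- key in varying = {"activation_type", "bn", "seed", "project"}
def pvVarying (k : String) : Bool :=
  k == "activation_type" || k == "bn" || k == "seed" || k == "project"

def extract_shared (configs : List (String × List (String × String))) : List (String × String) :=
  match configs with
  | [] => []   -- Python raises SystemExit here; excluded by Pre_extract_shared
  | (_, sample) :: _ =>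
    -- for key, first_value in sample_config.items(): … shared[key] = first_value
    sample.foldl (fun shared kv =>
      if pvVarying kv.1 then shared
      else if configs.all (fun c => (PySem.Dict.mk c.2).get? kv.1 == some kv.2) then
        shared ++ [kv]
      else shared) []

-- ===== PORT B =====
def extract_shared_alt (configs : List (String × List (String × String))) : List (String × String) :=
  match configs with
  | [] => []   -- B raises SystemExit too; excluded by Pre_extract_shared
  | (_, first) :: _ =>
    -- counts[item] = counts.get(item, 0) + 1 over every config's items
    let counts : PySem.Dict (String × String) Int :=
      configs.foldl (fun d c =>
        c.2.foldl (fun d item => d.insert item (d.getD item 0 + 1)) d)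
        PySem.Dict.empty
    let n : Int := configs.length
    -- {k: v for k, v in first.items() if k not in varying and counts.get((k, v), 0) == n}
    first.filter (fun kv => !pvVarying kv.1 && (counts.getD kv 0 == n))

-- ===== PRECONDITION & SPEC =====
-- Pre_ excludes the empty dict (A raises SystemExit there) and association lists with
-- duplicate keys, which do not represent Python dicts (the inputs of A are dicts, whose
-- keys are always distinct).
def Pre_extract_shared (configs : List (String × List (String × String))) : Prop :=
  configs ≠ [] ∧ (configs.map Prod.fst).Nodup ∧ ∀ c ∈ configs, (c.2.map Prod.fst).Nodup
instance (configs : List (String × List (String × String))) : Decidable (Pre_extract_shared configs) := by unfold Pre_extract_shared; infer_instance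

def pvWitness_extract_shared : (List (String × List (String × String))) :=
  [("run1", [("lr", "0.1"), ("bn", "yes"), ("wd", "5")]),
   ("run2", [("lr", "0.1"), ("wd", "4")])]

def Spec_extract_shared (configs : List (String × List (String × String))) (out : List (String × String)) : Prop := out = extract_shared_alt configs
instance (configs : List (String × List (String × String))) (out : List (String × String)) : Decidable (Spec_extract_shared configs out) := by unfold Spec_extract_shared; infer_instance

-- ===== CLAIM (what is proved, stated in full; the proofs are below) =====
def Claim_equal_extract_shared : Prop := ∀ (configs : List (String × List (String × String))), Dom_extract_shared configs → Pre_extract_shared configs → Spec_extract_shared configs (extract_shared configs)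

-- ===== LEMMAS AND PROOFS =====

-- A's accumulation loop is the filter by "not varying, and equal in every config".
theorem pvA_foldl_eq_filter (configs : List (String × List (String × String)))
    (sample init : List (String × String)) :
    sample.foldl (fun shared kv =>
      if pvVarying kv.1 then shared
      else if configs.all (fun c => (PySem.Dict.mk c.2).get? kv.1 == some kv.2) then
        shared ++ [kv]
      else shared) init
    = init ++ sample.filter (fun kv =>
        !pvVarying kv.1 && configs.all (fun c => (PySem.Dict.mk c.2).get? kv.1 == some kv.2)) := by
  induction sample generalizing init with
  | nil => simp
  | cons kv rest ih =>
    simp only [List.foldl_cons, List.filter_cons]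
    by_cases hv : pvVarying kv.1 = true
    · simp [hv, ih]
    · by_cases ha : configs.all (fun c => (PySem.Dict.mk c.2).get? kv.1 == some kv.2) = true
      · simp [hv, ha, ih]
      · simp [hv, ha, ih]

-- The counting loop over one config's items, read back at kv.
theorem pvInner_getD (l : List (String × String)) (d : PySem.Dict (String × String) Int)
    (kv : String × String) :
    (l.foldl (fun d item => d.insert item (d.getD item 0 + 1)) d).getD kv 0
    = d.getD kv 0 + l.count kv := by
  induction l generalizing d with
  | nil => simp
  | cons x xs ih =>
    simp only [List.foldl_cons, ih, List.count_cons]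
    rw [PySem.Dict.getD_insert]
    by_cases h : kv = x
    · subst h
      simp only [beq_self_eq_true, if_pos trivial]
      push_cast
      omega
    · have hb : ¬ (x = kv) := fun e => h e.symm
      simp [if_neg h, hb]

-- The nested counting loop counts kv across all configs' item lists.
theorem pvCounts_getD (cs : List (String × List (String × String)))
    (d : PySem.Dict (String × String) Int) (kv : String × String) :
    (cs.foldl (fun d c => c.2.foldl (fun d item => d.insert item (d.getD item 0 + 1)) d) d).getD kv 0
    = d.getD kv 0 + ((cs.map (fun c => c.2.count kv)).sum : Int) := by
  induction cs generalizing d with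
  | nil => simp
  | cons c rest ih =>
    simp only [List.foldl_cons, ih, pvInner_getD, List.map_cons, List.sum_cons]
    ring

-- In a duplicate-free association list, a pair occurs at most once.
theorem pvCount_le_one (l : List (String × String)) (hnd : (l.map Prod.fst).Nodup)
    (kv : String × String) : l.count kv ≤ 1 := by
  induction l with
  | nil => simp
  | cons x xs ih =>
    simp only [List.map_cons, List.nodup_cons] at hnd
    by_cases h : kv = x
    · subst h
      have hz : xs.count kv = 0 :=
        List.count_eq_zero.mpr (fun hmem => hnd.1 (List.mem_map.mpr ⟨kv, hmem, rfl⟩))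
      simp [hz]
    · have hb : ¬ (x = kv) := fun e => h e.symm
      simpa [List.count_cons, hb] using ih hnd.2

-- In a duplicate-free association list, the pair occurs once iff the dict lookup returns its value.
theorem pvCount_one_iff_get (l : List (String × String)) (hnd : (l.map Prod.fst).Nodup)
    (kv : String × String) :
    l.count kv = 1 ↔ (PySem.Dict.mk l).get? kv.1 = some kv.2 := by
  constructor
  · intro h
    have hmem : kv ∈ l := by
      rw [← List.count_pos_iff]; omega
    exact PySem.Dict.get?_of_mem_items (d := PySem.Dict.mk l) hmem hnd
  · intro h
    have hmem : kv ∈ l :=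
      PySem.Dict.mem_items_of_get?_eq_some (d := PySem.Dict.mk l) h
    have h1 : 1 ≤ l.count kv := List.one_le_count_iff.mpr hmem
    have h2 := pvCount_le_one l hnd kv
    omega

-- Casting a Nat-list sum to Int elementwise or at the end is the same.
theorem pvSum_cast (l : List Nat) : (l.map (Nat.cast : Nat → Int)).sum = (l.sum : Int) :=
  (Nat.cast_list_sum l).symm

-- Total pair count equals the number of configs iff every config's dict maps the key to the value.
theorem pvSum_eq_length_iff (cs : List (String × List (String × String)))
    (hnd : ∀ c ∈ cs, (c.2.map Prod.fst).Nodup) (kv : String × String) :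
    ((cs.map (fun c => c.2.count kv)).sum = cs.length)
    ↔ ∀ c ∈ cs, (PySem.Dict.mk c.2).get? kv.1 = some kv.2 := by
  induction cs with
  | nil => simp
  | cons c rest ih =>
    have hc := hnd c List.mem_cons_self
    have hrest : ∀ x ∈ rest, (x.2.map Prod.fst).Nodup :=
      fun x hx => hnd x (List.mem_cons_of_mem c hx)
    have hcle := pvCount_le_one c.2 hc kv
    have hsumle : (rest.map (fun c => c.2.count kv)).sum ≤ rest.length := by
      calc (rest.map (fun c => c.2.count kv)).sum
          ≤ (rest.map (fun _ => 1)).sum := by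
            apply List.sum_le_sum
            intro a ha
            exact pvCount_le_one a.2 (hrest a ha) kv
        _ = rest.length := by simp
    simp only [List.map_cons, List.sum_cons, List.length_cons, List.forall_mem_cons]
    rw [← ih hrest, ← pvCount_one_iff_get c.2 hc kv]
    omega

-- ===== VERDICT (by name: the statement is the Claim_ definition above) =====
theorem extract_shared_spec : Claim_equal_extract_shared := by
  intro configs _ hpre
  obtain ⟨hne, _, hinner⟩ := hpre
  unfold Spec_extract_shared
  match configs, hne with
  | (name, sample) :: rest, _ =>
    show extract_shared ((name, sample) :: rest) = extract_shared_alt ((name, sample) :: rest)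
    simp only [extract_shared, extract_shared_alt]
    rw [pvA_foldl_eq_filter, List.nil_append]
    refine List.filter_congr (fun kv hmem => ?_)
    by_cases hv : pvVarying kv.1 = true
    · simp only [hv, Bool.not_true, Bool.false_and]
    · simp only [hv, Bool.not_false, Bool.true_and]
      rw [pvCounts_getD]
      simp only [PySem.Dict.getD_empty, zero_add]
      have hiff := pvSum_eq_length_iff ((name, sample) :: rest) hinner kv
      rw [Bool.eq_iff_iff]
      simp only [List.all_eq_true, beq_iff_eq]
      rw [← hiff,
          show (fun c : String × List (String × String) =>
                 ((c.2.count kv : Nat) : Int)) =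
               ((Nat.cast : Nat → Int) ∘ fun c => c.2.count kv) from rfl,
          ← List.map_map, pvSum_cast]
      exact_mod_cast Iff.rfl
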